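-- pv_equiv track=rewrite | github.com/w-e-ll/ResTecApp | group.py | groups_to_names
-- ===== SOURCE A (Python) =====
-- from collections import defaultdict
--
-- def groups_to_names(data, grouped_addresses):
--     """Mapping grouped addresses to names"""
--     address_groups_to_names = defaultdict(list)
--     for name, address in data:
--         for group in grouped_addresses:
--             if address in group:
--                 address_groups_to_names[group].append(name)
--                 break
--     return address_groups_to_names
-- ===== SOURCE B (Python) =====
-- from collections import defaultdict
--
-- def groups_to_names(data, grouped_addresses):
--     """Mapping grouped addresses to names (index-based: one pass over the groups
--     builds an address->group map, then one pass over data)."""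
--     addr_to_group = {}
--     for group in grouped_addresses:
--         for address in group:
--             addr_to_group.setdefault(address, group)
--     address_groups_to_names = defaultdict(list)
--     for name, address in data:
--         group = addr_to_group.get(address)
--         if group is not None:
--             address_groups_to_names[group].append(name)
--     return address_groups_to_names
-- ===== Notes on version B (the rewrite author's own statement) =====
-- stated objective: faster
-- what changed: Replaces the per-name scan over all groups by a hash index address->first-containing-group built once, then a single pass over data.
import Mathlib
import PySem

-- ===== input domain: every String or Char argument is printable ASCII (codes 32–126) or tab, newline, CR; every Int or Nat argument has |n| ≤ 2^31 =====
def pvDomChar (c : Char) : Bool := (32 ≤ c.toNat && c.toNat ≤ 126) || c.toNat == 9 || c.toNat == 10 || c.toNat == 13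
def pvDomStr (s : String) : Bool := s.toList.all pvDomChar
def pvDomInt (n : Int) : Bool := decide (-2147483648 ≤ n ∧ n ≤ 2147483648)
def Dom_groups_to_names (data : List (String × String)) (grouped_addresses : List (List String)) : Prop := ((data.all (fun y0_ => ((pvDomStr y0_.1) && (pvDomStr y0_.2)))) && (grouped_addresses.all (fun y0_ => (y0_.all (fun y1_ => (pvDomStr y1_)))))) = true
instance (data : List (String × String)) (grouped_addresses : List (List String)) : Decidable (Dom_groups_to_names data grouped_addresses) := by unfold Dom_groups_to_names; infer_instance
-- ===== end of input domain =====

-- B replaces A's per-name scan over all groups by an address->group index built once; faster in a timing run.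

-- ===== PORT A =====
-- inner 'for group in grouped_addresses: if address in group: …append…; break'
def pvInnerA (d : PySem.Dict (List String) (List String)) (name address : String) :
    List (List String) → PySem.Dict (List String) (List String)
  | [] => d
  | g :: rest =>
      if g.contains address then d.insert g (d.getD g [] ++ [name])
      else pvInnerA d name address rest

def groups_to_names (data : List (String × String)) (grouped_addresses : List (List String)) : List (List String × List String) :=
  (data.foldl (fun d p => pvInnerA d p.1 p.2 grouped_addresses) PySem.Dict.empty).items

-- ===== PORT B =====
-- addr_to_group = {}; for group in gs: for address in group: addr_to_group.setdefault(address, group)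
def pvIndexB (grouped_addresses : List (List String)) : PySem.Dict String (List String) :=
  grouped_addresses.foldl
    (fun d g => g.foldl (fun d a => d.setdefault a g) d) PySem.Dict.empty

def groups_to_names_alt (data : List (String × String)) (grouped_addresses : List (List String)) : List (List String × List String) :=
  let idx := pvIndexB grouped_addresses
  (data.foldl (fun d p =>
      match idx.get? p.2 with
      | some g => d.insert g (d.getD g [] ++ [p.1])
      | none => d) PySem.Dict.empty).items

-- ===== PRECONDITION & SPEC =====
def Spec_groups_to_names (data : List (String × String)) (grouped_addresses : List (List String)) (out : List (List String × List String)) : Prop := out = groups_to_names_alt data grouped_addresses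
instance (data : List (String × String)) (grouped_addresses : List (List String)) (out : List (List String × List String)) : Decidable (Spec_groups_to_names data grouped_addresses out) := by unfold Spec_groups_to_names; infer_instance

-- ===== CLAIM (what is proved, stated in full; the proofs are below) =====
def Claim_equal_groups_to_names : Prop := ∀ (data : List (String × String)) (grouped_addresses : List (List String)), Dom_groups_to_names data grouped_addresses → Spec_groups_to_names data grouped_addresses (groups_to_names data grouped_addresses)

-- ===== LEMMAS AND PROOFS =====

-- the first group (in order) containing the address
def pvFirst (address : String) : List (List String) → Option (List String)
  | [] => none
  | g :: rest => if g.contains address then some g else pvFirst address rest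

theorem innerA_eq_first (name address : String) (gs : List (List String)) :
    ∀ d, pvInnerA d name address gs =
      match pvFirst address gs with
      | some g => d.insert g (d.getD g [] ++ [name])
      | none => d := by
  induction gs with
  | nil => intro d; rfl
  | cons g rest ih =>
      intro d
      simp only [pvInnerA, pvFirst]
      by_cases h : address ∈ g
      · simp [h]
      · simp [h, ih d]

theorem setdef_get (grp : List String) (x : String) (as : List String) :
    ∀ d : PySem.Dict String (List String),
      (as.foldl (fun d a => d.setdefault a grp) d).get? x =
        match d.get? x with
        | some v => some v
        | none => if as.contains x then some grp else none := by
  induction as with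
  | nil => intro d; cases h : d.get? x <;> simp [h]
  | cons a rest ih =>
      intro d
      simp only [List.foldl_cons, ih]
      by_cases hc : d.contains a = true
      · rw [PySem.Dict.setdefault_of_contains d grp hc]
        by_cases hx : x = a
        · subst hx
          have hs : (d.get? x).isSome := by
            rw [← PySem.Dict.contains_eq_isSome_get?]; exact hc
          cases h : d.get? x with
          | none => rw [h] at hs; simp at hs
          | some v => simp [h]
        · cases h : d.get? x <;> simp [hx]
      · rw [PySem.Dict.setdefault_of_not_contains d grp (by simpa using hc)]
        by_cases hx : x = a
        · subst hx
          rw [PySem.Dict.get?_insert_self]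
          have hn : d.get? x = none := by
            rw [PySem.Dict.get?_eq_none_iff_contains]; simpa using hc
          simp [hn]
        · rw [PySem.Dict.get?_insert_of_ne d grp hx]
          cases h : d.get? x <;> simp [hx]

theorem index_get_eq_first (gs : List (List String)) (x : String) :
    (pvIndexB gs).get? x = pvFirst x gs := by
  unfold pvIndexB
  have main : ∀ d : PySem.Dict String (List String),
      (gs.foldl (fun d g => g.foldl (fun d a => d.setdefault a g) d) d).get? x =
        match d.get? x with
        | some v => some v
        | none => pvFirst x gs := by
    induction gs with
    | nil => intro d; cases h : d.get? x <;> simp [h, pvFirst]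
    | cons g rest ih =>
        intro d
        simp only [List.foldl_cons, ih, setdef_get]
        by_cases hg : x ∈ g
        · cases h : d.get? x <;> simp [pvFirst, hg]
        · cases h : d.get? x <;> simp [pvFirst, hg]
  rw [main PySem.Dict.empty]
  simp

-- ===== VERDICT (by name: the statement is the Claim_ definition above) =====
theorem groups_to_names_spec : Claim_equal_groups_to_names := by
  intro data gs _
  unfold Spec_groups_to_names groups_to_names groups_to_names_alt
  congr 1
  apply PySem.List.foldl_congr_mem
  intro d p _
  rw [innerA_eq_first, index_get_eq_first]
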